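-- pv_equiv track=rewrite | github.com/jjeaby/code_study | test3.py | solution
-- ===== SOURCE A (Python) =====
-- def solution(A):
--     # write your code in Python 3.6
--     A.sort()
--
--     stack = []
--     for index, item in enumerate( A ):
--
--         if index > 0 :
--             if len(stack) >0 and stack[-1] == item:
--                 stack.pop()
--                 continue
--
--         stack.append(item)
--
--     return stack[0]
-- ===== SOURCE B (Python) =====
-- def solution(A):
--     A.sort()
--     run_value = None
--     run_len = 0
--     for x in A:
--         if run_value is not None and x == run_value:
--             run_len += 1
--         else:
--             if run_len % 2 == 1:
--                 return run_value
--             run_value, run_len = x, 1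
--     if run_len % 2 == 1:
--         return run_value
-- ===== Notes on version B (the rewrite author's own statement) =====
-- stated objective: simpler
-- what changed: Replaces the cancellation stack (append/pop of adjacent equal pairs, answer read from the bottom of the surviving stack) with a single run-length counter over the sorted list that returns the first value whose run length is odd, keeping the in-place sort; Pre_ excludes lists where no value occurs an odd number of times, on which A raises IndexError (B returns None there).
import Mathlib
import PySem

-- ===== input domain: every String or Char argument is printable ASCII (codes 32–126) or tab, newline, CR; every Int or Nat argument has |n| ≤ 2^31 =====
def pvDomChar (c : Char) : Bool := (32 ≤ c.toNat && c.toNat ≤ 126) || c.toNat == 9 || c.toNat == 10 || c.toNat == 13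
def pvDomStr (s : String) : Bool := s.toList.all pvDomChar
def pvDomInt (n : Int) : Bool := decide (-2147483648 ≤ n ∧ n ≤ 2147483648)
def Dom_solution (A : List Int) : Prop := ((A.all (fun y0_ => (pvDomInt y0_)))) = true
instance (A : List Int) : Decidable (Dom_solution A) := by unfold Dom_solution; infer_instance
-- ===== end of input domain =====

-- B replaces A's cancellation stack with a single run-length scan of the sorted list (objective: simpler).
-- Both Pythons sort A in place (same side effect); the equivalence proved here is about the return value.

-- ===== PORT A =====
-- one loop step: state = (stack, index); enumerate ported as an explicit counter
def aStep (st : List Int × Nat) (item : Int) : List Int × Nat :=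
  let stack := st.1
  let index := st.2
  if index > 0 ∧ stack ≠ [] ∧ stack.getLast? = some item then
    (stack.dropLast, index + 1)          -- stack.pop(); continue
  else
    (stack ++ [item], index + 1)         -- stack.append(item)

def solution (A : List Int) : Int :=
  let s := PySem.List.sorted A (fun x => x) false   -- A.sort() (in-place; return value tracked here)
  let stack := (s.foldl aStep ([], 0)).1
  stack.headD 0                                     -- stack[0]; empty stack = IndexError, excluded by Pre_

-- ===== PORT B =====
-- one loop step: state = (returned?, run_value, run_len)
def bStep (st : Option Int × Option Int × Int) (x : Int) : Option Int × Option Int × Int :=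
  match st with
  | (some r, rv, rl) => (some r, rv, rl)            -- already returned: rest of the loop is skipped
  | (none, rv, rl) =>
    if rv = some x then (none, rv, rl + 1)          -- run continues; rl % 2 below: rl ≥ 0 and divisor 2 > 0, so Lean's % = Python's %
    else if rl % 2 = 1 then (rv, rv, rl)            -- return run_value
    else (none, some x, 1)                          -- start a new run

def bFinish (st : Option Int × Option Int × Int) : Int :=
  match st with
  | (some r, _, _) => r
  | (none, rv, rl) => if rl % 2 = 1 then rv.getD 0 else 0   -- else branch = Python B falls through (None), excluded by Pre_

def solution_alt (A : List Int) : Int :=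
  let s := PySem.List.sorted A (fun x => x) false   -- A.sort()
  bFinish (s.foldl bStep (none, none, 0))

-- ===== PRECONDITION & SPEC =====
-- Pre_ excludes exactly the inputs on which A raises IndexError (stack[0] on an empty stack):
-- lists in which no value occurs an odd number of times (including the empty list); B returns no int value there.
def Pre_solution (A : List Int) : Prop := ∃ x ∈ A, A.count x % 2 = 1
instance (A : List Int) : Decidable (Pre_solution A) := by unfold Pre_solution; infer_instance
def pvWitness_solution : List Int := [2, 1, 2]

def Spec_solution (A : List Int) (out : Int) : Prop := out = solution_alt A
instance (A : List Int) (out : Int) : Decidable (Spec_solution A out) := by unfold Spec_solution; infer_instance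

-- ===== CLAIM (what is proved, stated in full; the proofs are below) =====
def Claim_equal_solution : Prop := ∀ (A : List Int), Dom_solution A → Pre_solution A → Spec_solution A (solution A)

-- ===== LEMMAS AND PROOFS =====

-- A's loop body once the index is ≥ 1 (the index test is then always true)
def gStep (stack : List Int) (item : Int) : List Int :=
  if stack ≠ [] ∧ stack.getLast? = some item then stack.dropLast else stack ++ [item]

theorem foldl_aStep_eq_gStep : ∀ (s : List Int) (stack : List Int) (n : Nat), 1 ≤ n →
    (s.foldl aStep (stack, n)).1 = s.foldl gStep stack := by
  intro s
  induction s with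
  | nil => intro stack n _; rfl
  | cons x t ih =>
    intro stack n hn
    simp only [List.foldl_cons, aStep, gStep]
    by_cases h : stack ≠ [] ∧ stack.getLast? = some x
    · have : n > 0 ∧ stack ≠ [] ∧ stack.getLast? = some x := ⟨hn, h⟩
      rw [if_pos this, if_pos h]; exact ih _ _ (by omega)
    · have : ¬ (n > 0 ∧ stack ≠ [] ∧ stack.getLast? = some x) := by
        intro hc; exact h ⟨hc.2.1, hc.2.2⟩
      rw [if_neg this, if_neg h]; exact ih _ _ (by omega)

-- an element strictly below everything still to come stays at the bottom of the stack untouched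
theorem foldl_gStep_lift : ∀ (t : List Int) (v : Int) (st : List Int), (∀ x ∈ t, v ≠ x) →
    t.foldl gStep (v :: st) = v :: t.foldl gStep st := by
  intro t
  induction t with
  | nil => intro v st _; rfl
  | cons x t ih =>
    intro v st hne
    have hvx : v ≠ x := hne x (by simp)
    have hrest : ∀ y ∈ t, v ≠ y := fun y hy => hne y (by simp [hy])
    simp only [List.foldl_cons, gStep]
    match st with
    | [] =>
      have h1 : ¬ (([] : List Int) ≠ [] ∧ ([] : List Int).getLast? = some x) := by simp
      have h2 : ¬ ((v :: ([] : List Int)) ≠ [] ∧ (v :: ([] : List Int)).getLast? = some x) := by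
        simp [hvx]
      rw [if_neg h1, if_neg h2]
      exact ih v [x] hrest
    | y :: st' =>
      by_cases h : (y :: st').getLast? = some x
      · have h1 : (y :: st') ≠ [] ∧ (y :: st').getLast? = some x := ⟨by simp, h⟩
        have h2 : (v :: y :: st') ≠ [] ∧ (v :: y :: st').getLast? = some x := by
          constructor
          · simp
          · rw [List.getLast?_cons_cons]; exact h
        rw [if_pos h1, if_pos h2, List.dropLast_cons_of_ne_nil (by simp)]
        exact ih v _ hrest
      · have h1 : ¬ ((y :: st') ≠ [] ∧ (y :: st').getLast? = some x) := by simp [h]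
        have h2 : ¬ ((v :: y :: st') ≠ [] ∧ (v :: y :: st').getLast? = some x) := by
          rw [List.getLast?_cons_cons]; simp [h]
        rw [if_neg h1, if_neg h2]
        have := ih v ((y :: st') ++ [x]) hrest
        simpa using this

theorem foldl_bStep_found : ∀ (t : List Int) (r : Int) (rv : Option Int) (rl : Int),
    t.foldl bStep (some r, rv, rl) = (some r, rv, rl) := by
  intro t
  induction t with
  | nil => intro r rv rl; rfl
  | cons x t ih => intro r rv rl; simp only [List.foldl_cons, bStep]; exact ih r rv rl

-- the main invariant: mid-run, A's stack is [v] iff the current run length c is odd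
theorem main_inv : ∀ (r : List Int), r.Pairwise (· ≤ ·) → ∀ (v : Int) (c : Int), 0 < c →
    (∀ x ∈ r, v ≤ x) →
    (r.foldl gStep (if c % 2 = 1 then [v] else [])).headD 0
      = bFinish (r.foldl bStep (none, some v, c)) := by
  intro r
  induction r with
  | nil =>
    intro _ v c _ _
    simp only [List.foldl_nil, bFinish]
    by_cases h : c % 2 = 1 <;> simp [h]
  | cons x t ih =>
    intro hp v c hc hle
    have hvx : v ≤ x := hle x (by simp)
    have htp : t.Pairwise (· ≤ ·) := (List.pairwise_cons.mp hp).2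
    have hxt : ∀ y ∈ t, x ≤ y := (List.pairwise_cons.mp hp).1
    rcases eq_or_lt_of_le hvx with heq | hlt
    · -- x = v : the run continues
      subst heq
      simp only [List.foldl_cons, bStep]
      have hstack : gStep (if c % 2 = 1 then [v] else []) v
          = (if (c + 1) % 2 = 1 then [v] else []) := by
        by_cases h : c % 2 = 1
        · have h2 : ¬ (c + 1) % 2 = 1 := by omega
          simp [h, h2, gStep]
        · have h2 : (c + 1) % 2 = 1 := by omega
          simp [h, h2, gStep]
      rw [hstack]
      exact ih htp v (c + 1) (by omega) (fun y hy => hle y (by simp [hy]))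
    · -- v < x : the run ends here
      have hne : ¬ ((some v : Option Int) = some x) := by
        intro h; exact absurd (Option.some.inj h) (ne_of_lt hlt)
      simp only [List.foldl_cons, bStep, if_neg hne]
      by_cases h : c % 2 = 1
      · -- odd run: B returns v; A keeps v at the bottom forever
        rw [if_pos h, if_pos h, foldl_bStep_found]
        have hstack : gStep [v] x = v :: [x] := by
          simp [gStep, ne_of_lt hlt]
        rw [hstack, foldl_gStep_lift t v [x]
          (fun y hy => ne_of_lt (lt_of_lt_of_le hlt (hxt y hy)))]
        simp [bFinish]
      · -- even run: cancelled out; B and A both restart at x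
        rw [if_neg h, if_neg h]
        have hstack : gStep [] x = (if (1 : Int) % 2 = 1 then [x] else []) := by
          simp [gStep]
        rw [hstack]
        exact ih htp x 1 (by omega) hxt

theorem solution_eq_alt (A : List Int) : solution A = solution_alt A := by
  unfold solution solution_alt
  have hp : (PySem.List.sorted A (fun x => x) false).Pairwise (· ≤ ·) :=
    PySem.List.sorted_pairwise A (fun x => x)
  cases hs : PySem.List.sorted A (fun x => x) false with
  | nil => rfl
  | cons x t =>
    rw [hs] at hp
    have htp : t.Pairwise (· ≤ ·) := (List.pairwise_cons.mp hp).2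
    have hxt : ∀ y ∈ t, x ≤ y := (List.pairwise_cons.mp hp).1
    simp only [List.foldl_cons]
    have ha : aStep ([], 0) x = ([x], 1) := by simp [aStep]
    have hb : bStep (none, none, 0) x = (none, some x, 1) := by simp [bStep]
    rw [ha, hb, foldl_aStep_eq_gStep t [x] 1 (le_refl 1)]
    have h1 : ([x] : List Int) = (if (1 : Int) % 2 = 1 then [x] else []) := by norm_num
    rw [h1]
    exact main_inv t htp x 1 (by omega) hxt

-- ===== VERDICT (by name: the statement is the Claim_ definition above) =====
theorem solution_spec : Claim_equal_solution := by
  intro A _ _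
  unfold Spec_solution
  exact solution_eq_alt A
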